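-- pv_equiv track=rewrite | github.com/kowaalczyk/spark-minimal-algorithms | spark_minimal_algorithms/examples/countifs.py | emit_by_group
-- ===== SOURCE A (Python) =====
-- from typing import Dict, Any, Iterable, Optional, List, Tuple, Union
--
-- def emit_by_group(group_key: int, group_items: Iterable[Any]) -> Optional[Any]:  # type: ignore
--     bucket_idx = group_key
--
--     first_label: Optional[str] = None
--     n_points_for_first_label: Optional[int] = None
--     last_label: Optional[str] = None
--     n_points_for_last_label: Optional[int] = None
--     for point in group_items:
--         label, coords, type_info = point
--
--         if first_label is None:
--             first_label = label
--             n_points_for_first_label = 1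
--         elif first_label == label:
--             n_points_for_first_label += 1  # noqa: T484
--
--         if last_label == label:
--             n_points_for_last_label += 1  # noqa: T484
--         else:
--             last_label = label
--             n_points_for_last_label = 1
--
--     return bucket_idx, (first_label, n_points_for_first_label), (last_label, n_points_for_last_label)
-- ===== SOURCE B (Python) =====
-- def emit_by_group(group_key, group_items):
--     items = [(label, coords, type_info) for label, coords, type_info in group_items]
--     if not items:
--         return group_key, (None, None), (None, None)
--     labels = [p[0] for p in items]
--     first_label = labels[0]
--     n_first = labels.count(first_label)
--     last_label = labels[-1]
--     n_last = 0
--     for lab in reversed(labels):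
--         if lab != last_label:
--             break
--         n_last += 1
--     return group_key, (first_label, n_first), (last_label, n_last)
-- ===== Notes on version B (the rewrite author's own statement) =====
-- stated objective: simpler
-- what changed: Replaces the single stateful loop over four Optional accumulators with a direct decomposition: count the first label with list.count and measure the trailing run of the last label by a reverse scan.
import Mathlib
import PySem

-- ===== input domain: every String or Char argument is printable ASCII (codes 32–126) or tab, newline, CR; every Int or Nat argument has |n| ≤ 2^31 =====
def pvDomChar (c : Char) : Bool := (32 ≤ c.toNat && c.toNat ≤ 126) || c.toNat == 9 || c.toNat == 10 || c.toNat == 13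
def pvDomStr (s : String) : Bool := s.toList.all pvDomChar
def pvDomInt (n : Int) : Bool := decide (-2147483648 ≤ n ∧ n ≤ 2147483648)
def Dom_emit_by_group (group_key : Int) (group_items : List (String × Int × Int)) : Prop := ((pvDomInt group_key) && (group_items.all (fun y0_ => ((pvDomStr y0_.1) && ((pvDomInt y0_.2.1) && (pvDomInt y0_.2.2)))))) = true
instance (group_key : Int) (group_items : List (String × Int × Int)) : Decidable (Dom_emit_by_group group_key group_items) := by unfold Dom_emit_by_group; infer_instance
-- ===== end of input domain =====

-- B replaces A's single stateful loop over four Optional accumulators by a direct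
-- decomposition: count the first label over all items, and measure the trailing
-- consecutive run of the last label by a reverse scan (objective: simpler).

-- ===== PORT A =====
-- one loop step of A's for-loop over its four Optional accumulators
def pvStepA (st : (Option String × Option Int) × (Option String × Option Int))
    (point : String × Int × Int) :
    (Option String × Option Int) × (Option String × Option Int) :=
  let label := point.1
  let fst' :=
    if st.1.1 = none then (some label, some (1 : Int))
    else if st.1.1 = some label then (st.1.1, st.1.2.map (· + 1))
    else st.1
  let snd' :=
    if st.2.1 = some label then (st.2.1, st.2.2.map (· + 1))
    else (some label, some (1 : Int))
  (fst', snd')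

def emit_by_group (group_key : Int) (group_items : List (String × Int × Int)) :
    Int × (Option String × Option Int) × (Option String × Option Int) :=
  let bucket_idx := group_key
  let s := group_items.foldl pvStepA ((none, none), (none, none))
  (bucket_idx, s.1, s.2)

-- ===== PORT B =====
-- B's reverse scan with break: length of the run of `l` at the front of the list
def pvRunLen (l : String) : List String → Int
  | [] => 0
  | x :: xs => if x ≠ l then 0 else pvRunLen l xs + 1

def emit_by_group_alt (group_key : Int) (group_items : List (String × Int × Int)) :
    Int × (Option String × Option Int) × (Option String × Option Int) :=
  let labels := group_items.map (fun p => p.1)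
  match labels with
  | [] => (group_key, (none, none), (none, none))
  | f :: rest =>
    let n_first : Int := ((f :: rest).count f : Int)
    let last_label := (f :: rest).getLastD f          -- labels[-1] (list nonempty here)
    let n_last := pvRunLen last_label (f :: rest).reverse
    (group_key, (some f, some n_first), (some last_label, some n_last))

-- ===== PRECONDITION & SPEC =====
def Spec_emit_by_group (group_key : Int) (group_items : List (String × Int × Int)) (out : Int × (Option String × Option Int) × (Option String × Option Int)) : Prop := out = emit_by_group_alt group_key group_items
instance (group_key : Int) (group_items : List (String × Int × Int)) (out : Int × (Option String × Option Int) × (Option String × Option Int)) : Decidable (Spec_emit_by_group group_key group_items out) := by unfold Spec_emit_by_group; infer_instance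

-- ===== CLAIM (what is proved, stated in full; the proofs are below) =====
def Claim_equal_emit_by_group : Prop := ∀ (group_key : Int) (group_items : List (String × Int × Int)), Dom_emit_by_group group_key group_items → Spec_emit_by_group group_key group_items (emit_by_group group_key group_items)

-- ===== LEMMAS AND PROOFS =====

-- the closed form of A's loop state after a nonempty list with first label f and remaining labels ls
def pvClosed (f : String) (ls : List String) :
    (Option String × Option Int) × (Option String × Option Int) :=
  let L := ls.getLastD f
  ((some f, some ((f :: ls).count f : Int)),
   (some L, some (pvRunLen L (f :: ls).reverse)))

theorem pvReverse_head (f : String) (ls : List String) :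
    ∃ r, (f :: ls).reverse = ls.getLastD f :: r := by
  induction ls using List.reverseRecOn with
  | nil => exact ⟨[], rfl⟩
  | append_singleton zs z ih =>
    refine ⟨zs.reverse ++ [f], ?_⟩
    simp

theorem pvStep_closed (f a : String) (b : Int × Int) (ls : List String) :
    pvStepA (pvClosed f ls) (a, b) = pvClosed f (ls ++ [a]) := by
  obtain ⟨r, hr⟩ := pvReverse_head f ls
  have hlast : (ls ++ [a]).getLastD f = a := by simp
  have hrev : (f :: (ls ++ [a])).reverse = a :: ls.getLastD f :: r := by
    rw [show f :: (ls ++ [a]) = (f :: ls) ++ [a] by rfl, List.reverse_append, hr]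
    rfl
  have hcnt : ((f :: (ls ++ [a])).count f : Int)
      = ((f :: ls).count f : Int) + if f = a then 1 else 0 := by
    rw [show f :: (ls ++ [a]) = (f :: ls) ++ [a] by rfl, List.count_append]
    by_cases h : f = a
    · simp [h]
    · have : [a].count f = 0 := by
        simp [List.count_singleton]
        exact fun hh => h hh.symm
      simp [h, this]
  unfold pvClosed pvStepA
  simp only [hlast, hrev, hcnt, hr]
  by_cases hq : ls.getLastD f = a <;> by_cases h : f = a <;>
    simp only [hq, h, pvRunLen, reduceCtorEq, ne_eq, not_true_eq_false, not_false_eq_true,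
      if_true, Option.some.injEq, Option.map_some, Prod.mk.injEq, and_true, true_and,
      if_neg] <;>
    simp_all

theorem pvFoldA (t : List (String × Int × Int)) (p : String × Int × Int) :
    (p :: t).foldl pvStepA ((none, none), (none, none)) =
      pvClosed p.1 (t.map (fun q => q.1)) := by
  induction t using List.reverseRecOn generalizing p with
  | nil =>
    simp [pvStepA, pvClosed, pvRunLen]
  | append_singleton ys q ih =>
    have h1 : (p :: (ys ++ [q])).foldl pvStepA ((none, none), (none, none))
        = pvStepA ((p :: ys).foldl pvStepA ((none, none), (none, none))) q := by
      rw [show p :: (ys ++ [q]) = (p :: ys) ++ [q] by rfl, List.foldl_append]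
      rfl
    obtain ⟨q1, qb⟩ := q
    rw [h1, ih, pvStep_closed]
    simp

-- ===== VERDICT (by name: the statement is the Claim_ definition above) =====
theorem emit_by_group_spec : Claim_equal_emit_by_group := by
  intro gk gi _
  unfold Spec_emit_by_group
  cases gi with
  | nil => rfl
  | cons p t =>
    simp only [emit_by_group, emit_by_group_alt, pvFoldA, pvClosed, List.map_cons,
      List.getLastD_cons]
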